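-- pv_equiv track=rewrite | github.com/Ys-Yuan/DECA | src/data_loader/manager.py | _partition_uniform
-- ===== SOURCE A (Python) =====
-- from typing import List, Dict, Any, Union
--
-- def _partition_uniform(data, num_clients, **kwargs) -> List[List[int]]:
--     samples_per_client = len(data) // num_clients
--     client_indices = []
--     for i in range(num_clients):
--         start = i * samples_per_client
--         end = start + samples_per_client if i < num_clients - 1 else len(data)
--         client_indices.append(list(range(start, end)))
--     return client_indices
-- ===== SOURCE B (Python) =====
-- def _partition_uniform(data, num_clients, **kwargs):
--     samples_per_client = len(data) // num_clients
--     result = [[] for _ in range(num_clients)]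
--     for j in range(len(data)):
--         i = min(j // samples_per_client, num_clients - 1) if samples_per_client else num_clients - 1
--         result[i].append(j)
--     return result
-- ===== Notes on version B (the rewrite author's own statement) =====
-- stated objective: alternative
-- what changed: Replaces A's per-client construction of index ranges with a single pass over all data indices that distributes each index j into bucket min(j // samples_per_client, num_clients - 1) of a pre-allocated list of buckets.
-- outside the precondition, e.g. on _partition_uniform([1, 2, 3], -1): A returns [], B raises IndexError
import Mathlib
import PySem

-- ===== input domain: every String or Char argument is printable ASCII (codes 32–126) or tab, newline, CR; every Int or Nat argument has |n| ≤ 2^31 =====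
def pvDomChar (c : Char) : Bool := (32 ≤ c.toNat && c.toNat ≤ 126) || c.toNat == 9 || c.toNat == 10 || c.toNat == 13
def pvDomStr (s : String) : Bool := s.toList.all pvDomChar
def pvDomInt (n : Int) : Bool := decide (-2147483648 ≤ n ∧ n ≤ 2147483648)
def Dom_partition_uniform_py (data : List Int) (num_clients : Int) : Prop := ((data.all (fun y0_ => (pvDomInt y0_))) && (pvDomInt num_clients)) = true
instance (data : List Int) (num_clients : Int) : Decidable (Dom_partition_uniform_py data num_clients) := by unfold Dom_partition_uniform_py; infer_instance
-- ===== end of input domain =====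

-- B replaces A's per-client range construction by a single pass over all data
-- indices distributing each index into its client bucket (alternative decomposition,
-- same asymptotic cost); equivalence is proved for num_clients ≥ 1.

-- ===== PORT A =====
def partition_uniform_py (data : List Int) (num_clients : Int) : List (List Int) :=
  let samples_per_client : Int := PySem.Int.floordiv (data.length : Int) num_clients
  (PySem.List.pyRange 0 num_clients 1).foldl
    (fun client_indices i =>
      let start := i * samples_per_client
      let stop := if i < num_clients - 1 then start + samples_per_client else (data.length : Int)
      client_indices ++ [PySem.List.pyRange start stop 1]) []

-- ===== PORT B =====
def partition_uniform_py_alt (data : List Int) (num_clients : Int) : List (List Int) :=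
  let spc : Int := PySem.Int.floordiv (data.length : Int) num_clients
  let init := (PySem.List.pyRange 0 num_clients 1).map (fun _ => ([] : List Int))
  (PySem.List.pyRange 0 (data.length : Int) 1).foldl
    (fun result j =>
      let i := if spc ≠ 0 then min (PySem.Int.floordiv j spc) (num_clients - 1) else num_clients - 1
      PySem.List.pySetD result i (PySem.List.pyGetD result i [] ++ [j])) init

-- ===== PRECONDITION & SPEC =====
-- Pre_ excludes num_clients ≤ 0: at num_clients = 0 A raises ZeroDivisionError, and for
-- negative num_clients A's [] is an accident of range() over a negative count, on which
-- B's bucket indexing raises IndexError for nonempty data.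
def Pre_partition_uniform_py (data : List Int) (num_clients : Int) : Prop := 1 ≤ num_clients
instance (data : List Int) (num_clients : Int) : Decidable (Pre_partition_uniform_py data num_clients) := by unfold Pre_partition_uniform_py; infer_instance
def pvWitness_partition_uniform_py : List Int × Int := ([5, 6, 7, 8, 9], 2)

def Spec_partition_uniform_py (data : List Int) (num_clients : Int) (out : List (List Int)) : Prop := out = partition_uniform_py_alt data num_clients
instance (data : List Int) (num_clients : Int) (out : List (List Int)) : Decidable (Spec_partition_uniform_py data num_clients out) := by unfold Spec_partition_uniform_py; infer_instance

-- ===== CLAIM (what is proved, stated in full; the proofs are below) =====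
def Claim_equal_partition_uniform_py : Prop := ∀ (data : List Int) (num_clients : Int), Dom_partition_uniform_py data num_clients → Pre_partition_uniform_py data num_clients → Spec_partition_uniform_py data num_clients (partition_uniform_py data num_clients)

-- ===== LEMMAS AND PROOFS =====

-- A's loop appends one list per client: it is a map over range(num_clients).
lemma foldl_append_singleton {α β : Type} (g : α → β) (l : List α) (acc : List β) :
    l.foldl (fun acc i => acc ++ [g i]) acc = acc ++ l.map g := by
  induction l generalizing acc with
  | nil => simp
  | cons x xs ih => simp [ih, List.append_assoc]

-- B's loop distributes each j into bucket f j: the result is, bucket by bucket,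
-- the filter of the traversed indices landing there.
lemma foldl_distrib (f : Int → Int) (js : List Int) (res : List (List Int))
    (hf : ∀ j ∈ js, 0 ≤ f j ∧ f j < (res.length : Int)) :
    js.foldl (fun r j => PySem.List.pySetD r (f j) (PySem.List.pyGetD r (f j) [] ++ [j])) res
    = res.mapIdx (fun k b => b ++ js.filter (fun j => f j = (k : Int))) := by
  induction js generalizing res with
  | nil =>
    induction res with
    | nil => simp
    | cons b bs ihb => simpa [List.mapIdx_cons] using ihb
  | cons j js ih =>
    obtain ⟨h0, hlt⟩ := hf j (by simp)
    have hstep : PySem.List.pySetD res (f j) (PySem.List.pyGetD res (f j) [] ++ [j])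
        = res.set (f j).toNat (res[(f j).toNat]'(by omega) ++ [j]) := by
      rw [PySem.List.pySetD_of_nonneg _ _ h0, PySem.List.pyGetD_eq_getElem _ _ h0 hlt]
    rw [List.foldl_cons, hstep, ih _ (by
      intro x hx
      have := hf x (by simp [hx])
      simpa using this)]
    apply List.ext_getElem
    · simp
    · intro k hk1 hk2
      simp only [List.getElem_mapIdx, List.getElem_set]
      have hklen : k < res.length := by simpa using hk1
      by_cases hkt : (f j).toNat = k
      · have hfk : f j = (k : Int) := by omega
        simp [hfk, List.append_assoc]
      · have hfk : ¬ (f j = (k : Int)) := by omega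
        simp [hkt, hfk]

-- filtering a range by an interval predicate yields the subrange
lemma filter_pyRange_interval (a lo hi b : Int) (h1 : a ≤ lo) (h2 : lo ≤ hi) (h3 : hi ≤ b) :
    (PySem.List.pyRange a b 1).filter (fun j => decide (lo ≤ j ∧ j < hi))
      = PySem.List.pyRange lo hi 1 := by
  rw [PySem.List.pyRange_one_append a lo b h1 (h2.trans h3),
      PySem.List.pyRange_one_append lo hi b h2 h3,
      List.filter_append, List.filter_append]
  have e1 : (PySem.List.pyRange a lo 1).filter (fun j => decide (lo ≤ j ∧ j < hi)) = [] := by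
    rw [List.filter_eq_nil_iff]
    intro x hx
    have := (PySem.List.mem_pyRange_one).mp hx
    simp; omega
  have e2 : (PySem.List.pyRange lo hi 1).filter (fun j => decide (lo ≤ j ∧ j < hi))
      = PySem.List.pyRange lo hi 1 := by
    rw [List.filter_eq_self]
    intro x hx
    have := (PySem.List.mem_pyRange_one).mp hx
    simp; omega
  have e3 : (PySem.List.pyRange hi b 1).filter (fun j => decide (lo ≤ j ∧ j < hi)) = [] := by
    rw [List.filter_eq_nil_iff]
    intro x hx
    have := (PySem.List.mem_pyRange_one).mp hx
    simp; omega
  rw [e1, e2, e3]; simp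

-- the indices landing in bucket k form exactly A's range for client k
lemma bucket_filter (N M spc : Int) (_hM : 1 ≤ M) (_hN : 0 ≤ N) (hspc0 : 0 ≤ spc)
    (hMspc : M * spc ≤ N) (k : Nat) (hk : (k : Int) < M) :
    (PySem.List.pyRange 0 N 1).filter
      (fun j => (if spc ≠ 0 then min (PySem.Int.floordiv j spc) (M - 1) else M - 1) = (k : Int))
    = PySem.List.pyRange ((k : Int) * spc)
        (if (k : Int) < M - 1 then (k : Int) * spc + spc else N) 1 := by
  have hk0 : (0 : Int) ≤ (k : Int) := by positivity
  by_cases hz : spc = 0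
  · by_cases hkM : (k : Int) < M - 1
    · have hne : ¬ (M - 1 = (k : Int)) := by omega
      rw [List.filter_eq_nil_iff.mpr (by intro x _; simp [hz, hne])]
      rw [if_pos hkM, hz]
      rw [PySem.List.pyRange_one_eq_nil (by omega)]
    · have heq : M - 1 = (k : Int) := by omega
      rw [List.filter_eq_self.mpr (by intro x _; simp [hz, heq])]
      rw [if_neg hkM, hz, mul_zero]
  · have hsp : (0 : Int) < spc := by omega
    have hbody : ∀ j, (if spc ≠ 0 then min (PySem.Int.floordiv j spc) (M - 1) else M - 1)
        = min (PySem.Int.floordiv j spc) (M - 1) := by intro j; rw [if_pos hz]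
    by_cases hkM : (k : Int) < M - 1
    · rw [if_pos hkM]
      rw [List.filter_congr (q := fun j => decide ((k : Int) * spc ≤ j ∧ j < (k : Int) * spc + spc))
        ?_]
      · exact filter_pyRange_interval 0 _ _ N (by positivity) (by linarith) (by
          have h5 : ((k : Int) + 1) * spc ≤ M * spc :=
            mul_le_mul_of_nonneg_right (by omega) hspc0
          nlinarith)
      · intro j hj
        obtain ⟨hj0, hjN⟩ := (PySem.List.mem_pyRange_one).mp hj
        have hbr := PySem.Int.floordiv_eq_iff_of_pos (a := j) (b := spc) (q := (k : Int)) hsp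
        simp only [hbody, decide_eq_decide]
        constructor
        · intro h
          have hfd : PySem.Int.floordiv j spc = (k : Int) := by omega
          have := hbr.mp hfd
          constructor
          · exact this.1
          · nlinarith [this.2]
        · rintro ⟨h1, h2⟩
          have hfd : PySem.Int.floordiv j spc = (k : Int) := hbr.mpr ⟨h1, by nlinarith⟩
          omega
    · have hk1 : (k : Int) = M - 1 := by omega
      rw [if_neg hkM]
      rw [List.filter_congr (q := fun j => decide ((k : Int) * spc ≤ j ∧ j < N)) ?_]
      · exact filter_pyRange_interval 0 _ _ N (by positivity) (by
          have h5 : (k : Int) * spc ≤ M * spc := mul_le_mul_of_nonneg_right (by omega) hspc0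
          nlinarith) (le_refl N)
      · intro j hj
        obtain ⟨hj0, hjN⟩ := (PySem.List.mem_pyRange_one).mp hj
        have hle := PySem.Int.le_floordiv_iff_mul_le (a := j) (b := spc) (q := M - 1) hsp
        simp only [hbody, decide_eq_decide]
        rw [hk1]
        constructor
        · intro h
          exact ⟨hle.mp (by omega), hjN⟩
        · rintro ⟨h1, _⟩
          have := hle.mpr h1
          omega

-- ===== VERDICT (by name: the statement is the Claim_ definition above) =====
theorem partition_uniform_py_spec : Claim_equal_partition_uniform_py := by
  intro data num_clients _ hpre
  unfold Pre_partition_uniform_py at hpre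
  unfold Spec_partition_uniform_py partition_uniform_py partition_uniform_py_alt
  simp only []
  set M : Int := num_clients with hMdef
  set N : Int := (data.length : Int) with hNdef
  set spc : Int := PySem.Int.floordiv N M with hspcdef
  have hN0 : (0 : Int) ≤ N := by positivity
  have hspc0 : (0 : Int) ≤ spc := by
    rw [hspcdef, PySem.Int.floordiv_eq_ediv_of_pos (by omega)]
    exact Int.ediv_nonneg hN0 (by omega)
  have hMspc : M * spc ≤ N := by
    rw [hspcdef, PySem.Int.floordiv_eq_ediv_of_pos (by omega)]
    have h1 := Int.mul_ediv_add_emod N M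
    have h2 := Int.emod_nonneg N (by omega : M ≠ 0)
    omega
  have hlen : ((PySem.List.pyRange 0 M 1).map (fun _ => ([] : List Int))).length = (M - 0).toNat := by
    simp [PySem.List.length_pyRange_one]
  rw [foldl_append_singleton, foldl_distrib
      (fun j => if spc ≠ 0 then min (PySem.Int.floordiv j spc) (M - 1) else M - 1) _ _ (by
    intro j hj
    obtain ⟨hj0, hjN⟩ := (PySem.List.mem_pyRange_one).mp hj
    rw [hlen]
    beta_reduce
    by_cases hz : spc = 0
    · rw [if_neg (by simpa using hz)]
      constructor <;> omega
    · have hsp : (0 : Int) < spc := by omega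
      have hfd0 : (0 : Int) ≤ PySem.Int.floordiv j spc :=
        (PySem.Int.le_floordiv_iff_mul_le hsp).mpr (by simpa using hj0)
      rw [if_pos hz]
      constructor <;> omega)]
  apply List.ext_getElem
  · simp [PySem.List.length_pyRange_one]
  · intro k hk1 hk2
    have hkM : (k : Int) < M := by
      simp [PySem.List.length_pyRange_one] at hk1
      omega
    simp only [List.getElem_mapIdx, List.getElem_map, List.nil_append,
      PySem.List.getElem_pyRange_one, List.nil_append, zero_add]
    exact (bucket_filter N M spc hpre hN0 hspc0 hMspc k hkM).symm
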